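-- pv_equiv track=rewrite | github.com/jntam/python-exercises | 3. Realist/12. Perfect deck shuffle.py | perfect_shuffle
-- ===== SOURCE A (Python) =====
-- def perfect_shuffle(deck: list):
--     new_deck: list = []
--     half_len = int(len(deck) * 0.5)
--     deck1 = deck[: half_len]
--     deck2 = deck[half_len:]
--     for i in range(half_len):
--         new_deck.append(deck1[i])
--         new_deck.append(deck2[i])
--     return new_deck
-- ===== SOURCE B (Python) =====
-- def perfect_shuffle(deck: list):
--     # Scatter: iterate over the input cards and place each at its destination
--     # position in a preallocated output (card i < half goes to slot 2i; card
--     # half+i goes to slot 2i+1). Odd decks drop the last card, as out has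
--     # length 2*half.
--     half = len(deck) // 2
--     out = [0] * (2 * half)
--     for i, card in enumerate(deck[:2 * half]):
--         out[2 * i if i < half else 2 * (i - half) + 1] = card
--     return out
-- ===== Notes on version B (the rewrite author's own statement) =====
-- stated objective: alternative
-- what changed: B replaces A's gather (split the deck into two halves, then interleave them by reading both halves while iterating over output positions) with a scatter: it preallocates the output and makes one pass over the input deck, writing each card into its computed destination slot (2i for the first half, 2(i-half)+1 for the second).
import Mathlib
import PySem

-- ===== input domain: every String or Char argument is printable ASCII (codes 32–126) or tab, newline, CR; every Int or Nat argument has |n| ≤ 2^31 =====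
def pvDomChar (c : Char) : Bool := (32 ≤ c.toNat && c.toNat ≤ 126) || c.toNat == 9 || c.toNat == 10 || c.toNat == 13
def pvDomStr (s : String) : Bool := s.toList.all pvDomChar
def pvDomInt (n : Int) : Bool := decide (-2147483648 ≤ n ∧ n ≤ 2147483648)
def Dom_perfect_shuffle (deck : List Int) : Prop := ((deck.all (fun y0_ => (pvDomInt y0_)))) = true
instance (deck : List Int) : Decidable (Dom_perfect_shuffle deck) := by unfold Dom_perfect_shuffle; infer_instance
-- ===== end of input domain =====

-- B scatters: one pass over the input writing each card into its computed output slot,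
-- instead of A's gather that splits the deck into two halves and interleaves them (objective: alternative).


-- ===== PORT A =====
-- literal port of A: half_len = len(deck)//2 (int(len*0.5) is exact here), slice into two halves,
-- then append deck1[i], deck2[i] for i in range(half_len).  Indices i are always in range, so
-- pyGetD with default 0 computes exactly Python's deck1[i]/deck2[i].
def perfect_shuffle (deck : List Int) : List Int :=
  let half : Nat := deck.length / 2
  let deck1 := PySem.List.slice deck none (some (half : Int))
  let deck2 := PySem.List.slice deck (some (half : Int)) none
  (PySem.List.pyRange 0 (half : Int) 1).foldl
    (fun nd i => (nd ++ [PySem.List.pyGetD deck1 i 0]) ++ [PySem.List.pyGetD deck2 i 0]) []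

-- ===== PORT B =====
-- literal port of B: out = [0]*(2*half); for i, card in enumerate(deck[:2*half]):
-- out[dest] = card.  The destination 2*i or 2*(i-half)+1 is always in [0, 2*half),
-- in particular nonnegative, so '.toNat' of it and List.set compute Python's in-range
-- list assignment exactly.
def perfect_shuffle_alt (deck : List Int) : List Int :=
  let half : Nat := deck.length / 2
  (PySem.List.enumerate (deck.take (2 * half)) 0).foldl
    (fun out p =>
      out.set (if p.1 < (half : Int) then 2 * p.1 else 2 * (p.1 - (half : Int)) + 1).toNat p.2)
    (List.replicate (2 * half) 0)

-- ===== PRECONDITION & SPEC =====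
def Spec_perfect_shuffle (deck : List Int) (out : List Int) : Prop := out = perfect_shuffle_alt deck
instance (deck : List Int) (out : List Int) : Decidable (Spec_perfect_shuffle deck out) := by unfold Spec_perfect_shuffle; infer_instance

-- ===== CLAIM (what is proved, stated in full; the proofs are below) =====
def Claim_equal_perfect_shuffle : Prop := ∀ (deck : List Int), Dom_perfect_shuffle deck → Spec_perfect_shuffle deck (perfect_shuffle deck)

-- ===== LEMMAS AND PROOFS =====

-- a fold of List.set keeps the length
theorem length_foldl_set (ps : List (Nat × Int)) (init : List Int) :
    (ps.foldl (fun a p => a.set p.1 p.2) init).length = init.length := by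
  induction ps generalizing init with
  | nil => rfl
  | cons q qs ih => simp [List.foldl_cons, ih]

-- a fold of List.set reads back as the LAST write to the position, if any
theorem getElem?_foldl_set (ps : List (Nat × Int)) (init : List Int) (d : Nat)
    (hd : d < init.length) :
    (ps.foldl (fun a p => a.set p.1 p.2) init)[d]? =
      match ps.reverse.find? (fun p => p.1 == d) with
      | some p => some p.2
      | none => init[d]? := by
  induction ps using List.reverseRecOn with
  | nil => simp
  | append_singleton qs q ih =>
    rw [List.foldl_append]
    simp only [List.foldl_cons, List.foldl_nil, List.reverse_append, List.reverse_singleton,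
      List.singleton_append, List.find?_cons]
    by_cases h : q.1 = d
    · subst h
      simp only [beq_self_eq_true]
      have hl : q.1 < (List.foldl (fun a p => a.set p.1 p.2) init qs).length := by
        rw [length_foldl_set]; exact hd
      simp [hl]
    · have : (q.1 == d) = false := by simp [h]
      rw [this]
      rw [List.getElem?_set_ne h]
      exact ih

-- find? returns the unique matching element
theorem find?_unique {α : Type} (l : List α) (p : α → Bool) (x : α)
    (hx : x ∈ l) (hpx : p x = true) (huniq : ∀ y ∈ l, p y = true → y = x) :
    l.find? p = some x := by
  induction l with
  | nil => cases hx
  | cons a l ih =>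
    rw [List.find?_cons]
    by_cases ha : p a = true
    · rw [ha]; exact congrArg some (huniq a (List.mem_cons_self) ha)
    · have : p a = false := by simpa using ha
      rw [this]
      rcases List.mem_cons.mp hx with rfl | hx'
      · exact absurd hpx ha
      · exact ih hx' (fun y hy => huniq y (List.mem_cons_of_mem _ hy))

-- range(2n) visited as n pairs (2i, 2i+1)
theorem range_two_mul_flatMap (n : Nat) :
    List.range (2 * n) = (List.range n).flatMap (fun i => [2 * i, 2 * i + 1]) := by
  induction n with
  | zero => simp
  | succ m ih =>
    have h2 : 2 * (m + 1) = (2 * m) + 1 + 1 := by omega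
    rw [h2]
    rw [List.range_succ, List.range_succ]
    conv_rhs => rw [List.range_succ]
    rw [List.flatMap_append, ← ih]
    simp

-- A's port equals the gather formula: position d holds deck[d/2] (d even) / deck[half+d/2] (d odd)
theorem portA_eq_gather (deck : List Int) :
    perfect_shuffle deck =
      (List.range (2 * (deck.length / 2))).map
        (fun d => if d % 2 = 0 then deck.getD (d / 2) 0 else deck.getD (deck.length / 2 + d / 2) 0) := by
  unfold perfect_shuffle
  set half := deck.length / 2 with hhalf
  have hA : (PySem.List.pyRange 0 (half : Int) 1).foldl
      (fun nd i => (nd ++ [PySem.List.pyGetD (PySem.List.slice deck none (some (half : Int))) i 0])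
        ++ [PySem.List.pyGetD (PySem.List.slice deck (some (half : Int)) none) i 0]) []
      = (PySem.List.pyRange 0 (half : Int) 1).flatMap
        (fun i => [PySem.List.pyGetD (PySem.List.slice deck none (some (half : Int))) i 0,
                   PySem.List.pyGetD (PySem.List.slice deck (some (half : Int)) none) i 0]) := by
    have := PySem.List.foldl_append_eq_flatMap
      (l := PySem.List.pyRange 0 (half : Int) 1)
      (g := fun i => [PySem.List.pyGetD (PySem.List.slice deck none (some (half : Int))) i 0,
                      PySem.List.pyGetD (PySem.List.slice deck (some (half : Int)) none) i 0])
      (acc := [])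
    simpa using this
  simp only [hA]
  rw [PySem.List.slice_to_natCast, PySem.List.slice_from_natCast,
      PySem.List.pyRange_zero_nat, range_two_mul_flatMap, List.map_flatMap,
      List.flatMap_map]
  apply List.flatMap_congr
  intro i hi
  have hilt : i < half := List.mem_range.mp hi
  have e1 : (2 * i) / 2 = i := by omega
  have e2 : (2 * i + 1) / 2 = i := by omega
  have g1 : PySem.List.pyGetD (deck.take half) (i : Int) 0 = deck.getD i 0 := by
    rw [PySem.List.pyGetD_natCast]
    simp [List.getD, hilt]
  have g2 : PySem.List.pyGetD (deck.drop half) (i : Int) 0 = deck.getD (half + i) 0 := by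
    rw [PySem.List.pyGetD_natCast]
    simp [List.getD, List.getElem?_drop]
  simp [e1, e2, g1, g2]

-- B's scatter fold, rewritten as a plain set-fold over (destination, card) pairs
theorem portB_as_keyed_fold (deck : List Int) :
    perfect_shuffle_alt deck =
      ((List.range (2 * (deck.length / 2))).map
        (fun j => ((if j < deck.length / 2 then 2 * j else 2 * (j - deck.length / 2) + 1 : Nat),
                   deck.getD j 0))).foldl
        (fun a p => a.set p.1 p.2) (List.replicate (2 * (deck.length / 2)) 0) := by
  unfold perfect_shuffle_alt
  dsimp only
  set half := deck.length / 2 with hhalf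
  rw [PySem.List.enumerate_eq_map_pyRange (d := 0)]
  have hlen : PySem.List.len (deck.take (2 * half)) = ((2 * half : Nat) : Int) := by
    simp [PySem.List.len]; omega
  rw [hlen, PySem.List.pyRange_zero_nat]
  simp only [List.foldl_map]
  apply PySem.List.foldl_congr_mem
  intro a j hj
  have hjlt : j < 2 * half := List.mem_range.mp hj
  have hget : PySem.List.pyGetD (deck.take (2 * half)) ((j : Int)) 0 = deck.getD j 0 := by
    rw [PySem.List.pyGetD_natCast]
    simp [List.getD, hjlt]
  rw [hget]
  congr 1
  by_cases h : j < half
  · have hc : ((j : Int) < (half : Int)) := by exact_mod_cast h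
    simp only [h, hc, if_true]
    omega
  · have hc : ¬ ((j : Int) < (half : Int)) := by exact_mod_cast h
    simp only [h, hc, if_false]
    omega

theorem perfect_shuffle_spec_aux (deck : List Int) :
    perfect_shuffle deck = perfect_shuffle_alt deck := by
  rw [portA_eq_gather, portB_as_keyed_fold]
  set half := deck.length / 2 with hhalf
  set K := (List.range (2 * half)).map
      (fun j => ((if j < half then 2 * j else 2 * (j - half) + 1 : Nat), deck.getD j 0)) with hK
  apply List.ext_getElem?
  intro d
  by_cases hd : d < 2 * half
  · rw [getElem?_foldl_set _ _ _ (by simpa using hd)]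
    set j0 : Nat := if d % 2 = 0 then d / 2 else half + d / 2 with hj0
    have hj0lt : j0 < 2 * half := by
      by_cases he : d % 2 = 0 <;> simp only [hj0, he, if_true, if_false] <;> omega
    have hdest : (if j0 < half then 2 * j0 else 2 * (j0 - half) + 1) = d := by
      by_cases he : d % 2 = 0
      · have h1 : j0 = d / 2 := by simp [hj0, he]
        have h2 : j0 < half := by omega
        rw [if_pos h2, h1]; omega
      · have h1 : j0 = half + d / 2 := by simp [hj0, he]
        have h2 : ¬ j0 < half := by omega
        rw [if_neg h2, h1]; omega
    have hfind : K.reverse.find? (fun p => p.1 == d) = some (d, deck.getD j0 0) := by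
      apply find?_unique (x := ((d : Nat), deck.getD j0 0))
      · rw [List.mem_reverse, hK, List.mem_map]
        exact ⟨j0, List.mem_range.mpr hj0lt, by simp only [hdest]⟩
      · simp
      · intro y hy hpy
        rw [List.mem_reverse, hK, List.mem_map] at hy
        obtain ⟨j, hj, rfl⟩ := hy
        have hjlt := List.mem_range.mp hj
        simp only [beq_iff_eq] at hpy
        have hjj : j = j0 := by
          by_cases h : j < half
          · rw [if_pos h] at hpy
            have he : d % 2 = 0 := by omega
            have : j0 = d / 2 := by simp [hj0, he]
            omega
          · rw [if_neg h] at hpy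
            have he : ¬ d % 2 = 0 := by omega
            have : j0 = half + d / 2 := by simp [hj0, he]
            omega
        subst hjj
        simp only [hdest]
    rw [hfind]
    have hr : (List.range (2 * half))[d]? = some d := by simp [hd]
    simp only [List.getElem?_map, hr, Option.map_some]
    by_cases he : d % 2 = 0 <;> simp [hj0, he]
  · have h1 : ((List.range (2 * half)).map
        (fun d => if d % 2 = 0 then deck.getD (d / 2) 0 else deck.getD (half + d / 2) 0))[d]? = none := by
      rw [List.getElem?_eq_none_iff]; simpa using (by omega : 2 * half ≤ d)
    have h2 : (K.foldl (fun a p => a.set p.1 p.2) (List.replicate (2 * half) 0))[d]? = none := by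
      rw [List.getElem?_eq_none_iff, length_foldl_set]; simpa using (by omega : 2 * half ≤ d)
    rw [h1, h2]

-- ===== VERDICT (by name: the statement is the Claim_ definition above) =====
theorem perfect_shuffle_spec : Claim_equal_perfect_shuffle := by
  intro deck _
  exact perfect_shuffle_spec_aux deck
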